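-- pv_equiv track=rewrite | github.com/notanoty/small-encryption-game | encrypter.py | encrypted_text_len
-- ===== SOURCE A (Python) =====
-- def encrypted_text_len(encrypted_text):
--     list_text = list(encrypted_text.lower())
--     max_line_size = 100
--     current_line_x = 1
--     current_line_y = 0
--     max_x = 0
--     for i in range(len(list_text)):
--         if list_text[i] == " " and current_line_x > max_line_size:
--             if max_x < current_line_x:
--                 max_x = current_line_x
--             current_line_x = 0
--             current_line_y += 1
--         current_line_x += 1
--     return (current_line_y, max_x)
-- ===== SOURCE B (Python) =====
-- def encrypted_text_len(encrypted_text):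
--     # index-table pass: collect space positions, then do arithmetic on gaps only
--     spaces = [j for j, c in enumerate(encrypted_text) if c == " "]
--     last_break = -1
--     lines = 0
--     max_x = 0
--     for j in spaces:
--         x = j - last_break
--         if x > 100:
--             max_x = max(max_x, x)
--             lines += 1
--             last_break = j
--     return (lines, max_x)
-- ===== Notes on version B (the rewrite author's own statement) =====
-- stated objective: alternative
-- what changed: B replaces A's per-character running line counter (with lower() copy) with a space-index table: it collects the indices of spaces once and then walks only those indices, computing each candidate line length arithmetically as j - last_break.
import Mathlib
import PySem

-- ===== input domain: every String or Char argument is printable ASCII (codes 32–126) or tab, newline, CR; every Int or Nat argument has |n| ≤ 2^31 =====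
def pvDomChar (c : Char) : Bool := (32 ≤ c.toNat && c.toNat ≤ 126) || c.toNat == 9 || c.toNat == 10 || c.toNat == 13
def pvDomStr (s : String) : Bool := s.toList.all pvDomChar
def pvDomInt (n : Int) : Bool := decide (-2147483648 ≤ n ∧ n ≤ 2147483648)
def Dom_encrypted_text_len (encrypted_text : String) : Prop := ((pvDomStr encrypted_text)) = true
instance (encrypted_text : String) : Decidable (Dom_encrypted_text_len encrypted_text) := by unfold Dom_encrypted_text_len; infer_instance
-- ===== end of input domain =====

-- B replaces A's per-character running counter with a space-index table plus gap arithmetic; objective: alternative decomposition (same O(n) cost).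

-- ===== PORT A =====
-- A's 'for i in range(len(list_text))' visits the characters of list_text in order,
-- reading only list_text[i]; ported as structural recursion over the list with A's
-- exact loop state (current_line_x, current_line_y, max_x).
def pvALoop : List Char → Int → Int → Int → Int × Int
  | [], _, y, m => (y, m)
  | c :: rest, x, y, m =>
    if c = ' ' ∧ x > 100 then
      -- if max_x < current_line_x: max_x = current_line_x; current_line_x = 0; y += 1; then x += 1
      pvALoop rest (0 + 1) (y + 1) (if m < x then x else m)
    else
      pvALoop rest (x + 1) y m

def encrypted_text_len (encrypted_text : String) : Int × Int :=
  pvALoop (PySem.Str.lower encrypted_text).toList 1 0 0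

-- ===== PORT B =====
-- comprehension '[j for j, c in enumerate(encrypted_text) if c == " "]' ported by
-- hand as a recursion carrying the running index (exact: same indices, same order)
def pvSpacesAt : List Char → Int → List Int
  | [], _ => []
  | c :: rest, i => if c = ' ' then i :: pvSpacesAt rest (i + 1) else pvSpacesAt rest (i + 1)

-- B's loop over the space indices with state (last_break, lines, max_x)
def pvBLoop : List Int → Int → Int → Int → Int × Int
  | [], _, y, m => (y, m)
  | j :: rest, last, y, m =>
    let x := j - last
    if x > 100 then pvBLoop rest j (y + 1) (max m x)
    else pvBLoop rest last y m

def encrypted_text_len_alt (encrypted_text : String) : Int × Int :=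
  pvBLoop (pvSpacesAt encrypted_text.toList 0) (-1) 0 0

-- ===== PRECONDITION & SPEC =====
def Spec_encrypted_text_len (encrypted_text : String) (out : Int × Int) : Prop := out = encrypted_text_len_alt encrypted_text
instance (encrypted_text : String) (out : Int × Int) : Decidable (Spec_encrypted_text_len encrypted_text out) := by unfold Spec_encrypted_text_len; infer_instance

-- ===== CLAIM (what is proved, stated in full; the proofs are below) =====
def Claim_equal_encrypted_text_len : Prop := ∀ (encrypted_text : String), Dom_encrypted_text_len encrypted_text → Spec_encrypted_text_len encrypted_text (encrypted_text_len encrypted_text)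

-- ===== LEMMAS AND PROOFS =====

-- lower() fixes exactly the spaces: lowerChar c = ' ' ↔ c = ' '
theorem pv_lowerChar_space (c : Char) : (PySem.Chars.lowerChar c = ' ') ↔ (c = ' ') := by
  simp only [PySem.Chars.lowerChar, PySem.Chars.isupper]
  split_ifs with h
  · constructor
    · intro hc
      exfalso
      simp only [Bool.and_eq_true, decide_eq_true_eq] at h
      obtain ⟨h1, h2⟩ := h
      rw [Char.le_def] at h1 h2
      rw [UInt32.le_iff_toNat_le] at h1 h2
      have hA : 65 ≤ c.toNat := h1
      have hZ : c.toNat ≤ 90 := h2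
      have hv : (c.toNat + 32).isValidChar := Or.inl (by omega)
      have h2' : (Char.ofNat (c.toNat + 32)).toNat = c.toNat + 32 := by
        rw [Char.toNat_ofNat, if_pos hv]
      have h3 := congrArg Char.toNat hc
      rw [h2'] at h3
      have hsp : (' ' : Char).toNat = 32 := rfl
      omega
    · intro hc; subst hc; simp at h
  · exact Iff.rfl

-- lowering a list does not move the space positions
theorem pv_spaces_lower (cs : List Char) (i : Int) :
    pvSpacesAt (PySem.Chars.lower cs) i = pvSpacesAt cs i := by
  induction cs generalizing i with
  | nil => rfl
  | cons c rest ih =>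
    simp only [PySem.Chars.lower, List.map_cons, pvSpacesAt]
    by_cases hc : c = ' '
    · rw [if_pos ((pv_lowerChar_space c).mpr hc), if_pos hc, ← PySem.Chars.lower, ih]
    · rw [if_neg (fun h => hc ((pv_lowerChar_space c).mp h)), if_neg hc, ← PySem.Chars.lower, ih]

-- main invariant: A at character position i with last break at 'last' (so
-- current_line_x = i - last) computes the same as B over the remaining space indices
theorem pv_loop_eq (cs : List Char) :
    ∀ (i last y m : Int),
      pvALoop cs (i - last) y m = pvBLoop (pvSpacesAt cs i) last y m := by
  induction cs with
  | nil => intro i last y m; rfl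
  | cons c rest ih =>
    intro i last y m
    simp only [pvALoop, pvSpacesAt]
    by_cases hc : c = ' '
    · rw [if_pos hc]
      simp only [pvBLoop]
      by_cases hx : i - last > 100
      · rw [if_pos ⟨hc, hx⟩, if_pos hx]
        have hm : (if m < i - last then i - last else m) = max m (i - last) := by
          by_cases h : m < i - last
          · rw [if_pos h, max_eq_right h.le]
          · rw [if_neg h, max_eq_left (not_lt.mp h)]
        rw [hm]
        have : (0 : Int) + 1 = (i + 1) - i := by ring
        rw [this, ih]
      · rw [if_neg (fun h => hx h.2), if_neg hx]
        have : i - last + 1 = (i + 1) - last := by ring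
        rw [this, ih]
    · rw [if_neg (fun h => hc h.1), if_neg hc]
      have : i - last + 1 = (i + 1) - last := by ring
      rw [this, ih]

-- ===== VERDICT (by name: the statement is the Claim_ definition above) =====
theorem encrypted_text_len_spec : Claim_equal_encrypted_text_len := by
  intro s _
  unfold Spec_encrypted_text_len encrypted_text_len encrypted_text_len_alt
  have hlower : (PySem.Str.lower s).toList = PySem.Chars.lower s.toList := by
    simp [PySem.Str.lower]
  rw [hlower]
  have h := pv_loop_eq (PySem.Chars.lower s.toList) 0 (-1) 0 0
  norm_num at h
  rw [h, pv_spaces_lower]
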